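-- pv_equiv track=rewrite | github.com/tapo-o/aois- | lab2/src/minimizer/method.py | build_karnaugh_map_string
-- ===== SOURCE A (Python) =====
-- def build_karnaugh_map_string(table, vars_count, vars_tuple) -> str:
--     table_dict = {"".join(map(str, row[0])): row[1] for row in table}
--     if vars_count == 1:
--         cols, rows = ("0", "1"), ("",)
--         row_vars, col_vars = "", vars_tuple[0]
--     elif vars_count == 2:
--         cols, rows = ("0", "1"), ("0", "1")
--         row_vars, col_vars = vars_tuple[0], vars_tuple[1]
--     elif vars_count == 3:
--         cols, rows = ("00", "01", "11", "10"), ("0", "1")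
--         row_vars, col_vars = vars_tuple[0], "".join(vars_tuple[1:])
--     elif vars_count == 4:
--         cols, rows = ("00", "01", "11", "10"), ("00", "01", "11", "10")
--         row_vars, col_vars = "".join(vars_tuple[:2]), "".join(vars_tuple[2:])
--     elif vars_count == 5:
--         cols = ("000", "001", "011", "010", "110", "111", "101", "100")
--         rows = ("00", "01", "11", "10")
--         row_vars, col_vars = "".join(vars_tuple[:2]), "".join(vars_tuple[2:])
--     else:
--         return "Карта слишком велика для вывода в консоль (максимум 5 переменных)."
--
--     header_corner = f"{row_vars}\\{col_vars}" if row_vars else f"\\{col_vars}"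
--     pad = max(len(header_corner), max(len(r) for r in rows) if rows[0] else 0)
--     res = []
--     header_line = f"{header_corner:<{pad}} | " + " | ".join(f"{c:^{len(c)}}" for c in cols)
--     res.append(header_line)
--     res.append("-" * len(header_line))
--     for r in rows:
--         line = [f"{r:<{pad}}"]
--         for c in cols:
--             key = r + c
--             val = str(table_dict.get(key, "?"))
--             line.append(f"{val:^{len(c)}}")
--         res.append(" | ".join(line))
--     return "\n".join(res)
-- ===== SOURCE B (Python) =====
-- def _gray(n):
--     # reflected Gray code sequence for n bits; ('',) for 0 bits
--     if n == 0:
--         return ("",)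
--     return tuple(format(i ^ (i >> 1), f"0{n}b") for i in range(1 << n))
--
--
-- def _render(table_dict, cols, rows, row_vars, col_vars):
--     header_corner = f"{row_vars}\\{col_vars}" if row_vars else f"\\{col_vars}"
--     pad = max(len(header_corner), max(len(r) for r in rows) if rows[0] else 0)
--     res = []
--     header_line = f"{header_corner:<{pad}} | " + " | ".join(f"{c:^{len(c)}}" for c in cols)
--     res.append(header_line)
--     res.append("-" * len(header_line))
--     for r in rows:
--         line = [f"{r:<{pad}}"]
--         for c in cols:
--             key = r + c
--             val = str(table_dict.get(key, "?"))
--             line.append(f"{val:^{len(c)}}")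
--         res.append(" | ".join(line))
--     return "\n".join(res)
--
--
-- def build_karnaugh_map_string(table, vars_count, vars_tuple) -> str:
--     if vars_count not in (1, 2, 3, 4, 5):
--         return "Карта слишком велика для вывода в консоль (максимум 5 переменных)."
--     table_dict = {"".join(map(str, row[0])): row[1] for row in table}
--     row_bits = vars_count // 2
--     rows = _gray(row_bits)
--     cols = _gray(vars_count - row_bits)
--     row_vars = "".join(vars_tuple[:row_bits])
--     col_vars = "".join(vars_tuple[row_bits:])
--     return _render(table_dict, cols, rows, row_vars, col_vars)
-- ===== Notes on version B (the rewrite author's own statement) =====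
-- stated objective: simpler
-- what changed: Replaces A's five hard-coded (cols, rows, row_vars, col_vars) branch arms by one computation: row_bits = vars_count // 2 and a reflected-Gray-code generator format(i ^ (i >> 1), '0nb') produce the row/column labels, and uniform slices of vars_tuple produce the axis names; the rendering stays as in A.
import Mathlib
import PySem

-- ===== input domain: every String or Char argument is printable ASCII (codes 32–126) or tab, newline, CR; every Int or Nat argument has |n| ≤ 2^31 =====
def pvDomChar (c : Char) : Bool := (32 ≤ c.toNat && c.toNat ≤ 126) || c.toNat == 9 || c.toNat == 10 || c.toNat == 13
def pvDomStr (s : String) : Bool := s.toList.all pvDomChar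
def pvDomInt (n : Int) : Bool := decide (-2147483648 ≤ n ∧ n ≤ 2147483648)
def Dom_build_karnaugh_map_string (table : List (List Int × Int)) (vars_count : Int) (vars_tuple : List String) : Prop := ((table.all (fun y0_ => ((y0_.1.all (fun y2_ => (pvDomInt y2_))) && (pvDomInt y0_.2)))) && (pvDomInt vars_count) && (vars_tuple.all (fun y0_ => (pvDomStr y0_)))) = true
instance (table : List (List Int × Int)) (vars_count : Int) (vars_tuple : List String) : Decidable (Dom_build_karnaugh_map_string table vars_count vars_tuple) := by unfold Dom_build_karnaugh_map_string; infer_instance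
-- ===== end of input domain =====

-- B replaces A's five hard-coded branch arms by a computed Gray-code label generator (objective: simpler).

-- ===== PORT A =====
-- shared by both ports: both Python sources contain this identical dict comprehension
def kmapTableDict (table : List (List Int × Int)) : PySem.Dict String Int :=
  table.foldl
    (fun d row => d.insert (PySem.Str.join "" (row.1.map PySem.Int.toStr)) row.2)
    PySem.Dict.empty

-- ' ' * n (n ≤ 0 gives "")
def kmapSpaces (n : Int) : String := String.ofList (List.replicate n.toNat ' ')

-- f"{s:<{w}}" : left-justify with spaces to width w
def kmapLjust (s : String) (w : Int) : String := s ++ kmapSpaces (w - PySem.Str.len s)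

-- f"{s:^{w}}" : center with spaces to width w (Python puts the smaller half on the left)
def kmapCenter (s : String) (w : Int) : String :=
  let d := w - PySem.Str.len s
  if d ≤ 0 then s
  else kmapSpaces (PySem.Int.floordiv d 2) ++ s ++ kmapSpaces (d - PySem.Int.floordiv d 2)

-- the header/padding/cell-formatting block, identical (step for step) in both Python sources;
-- rows is always nonempty at every call site, so rows[0] and max(len(r) for r in rows) never raise
-- (their Option results are read with .getD)
def kmapRender (table_dict : PySem.Dict String Int) (cols rows : List String)
    (row_vars col_vars : String) : String :=
  let header_corner := if row_vars ≠ "" then row_vars ++ "\\" ++ col_vars else "\\" ++ col_vars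
  let pad : Int := max (PySem.Str.len header_corner)
      (if ((PySem.List.pyGet? rows 0).getD "") ≠ "" then
        (PySem.List.max? (rows.map PySem.Str.len) id).getD 0 else 0)
  let header_line := kmapLjust header_corner pad ++ " | " ++
      PySem.Str.join " | " (cols.map (fun c => kmapCenter c (PySem.Str.len c)))
  let res := [header_line, String.ofList (List.replicate (PySem.Str.len header_line).toNat '-')]
  let body := rows.map (fun r =>
      PySem.Str.join " | " (kmapLjust r pad :: cols.map (fun c =>
        let key := r ++ c
        let val := match table_dict.get? key with
          | some v => PySem.Int.toStr v
          | none => "?"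
        kmapCenter val (PySem.Str.len c))))
  PySem.Str.join "\n" (res ++ body)

-- A's IndexError cases (vars_tuple[0] / [1] on a too-short list) are excluded by Pre_; .getD "" marks them
def build_karnaugh_map_string (table : List (List Int × Int)) (vars_count : Int) (vars_tuple : List String) : String :=
  let table_dict := kmapTableDict table
  if vars_count = 1 then
    kmapRender table_dict ["0", "1"] [""] "" ((PySem.List.pyGet? vars_tuple 0).getD "")
  else if vars_count = 2 then
    kmapRender table_dict ["0", "1"] ["0", "1"]
      ((PySem.List.pyGet? vars_tuple 0).getD "") ((PySem.List.pyGet? vars_tuple 1).getD "")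
  else if vars_count = 3 then
    kmapRender table_dict ["00", "01", "11", "10"] ["0", "1"]
      ((PySem.List.pyGet? vars_tuple 0).getD "")
      (PySem.Str.join "" (PySem.List.slice vars_tuple (some 1) none))
  else if vars_count = 4 then
    kmapRender table_dict ["00", "01", "11", "10"] ["00", "01", "11", "10"]
      (PySem.Str.join "" (PySem.List.slice vars_tuple none (some 2)))
      (PySem.Str.join "" (PySem.List.slice vars_tuple (some 2) none))
  else if vars_count = 5 then
    kmapRender table_dict ["000", "001", "011", "010", "110", "111", "101", "100"] ["00", "01", "11", "10"]
      (PySem.Str.join "" (PySem.List.slice vars_tuple none (some 2)))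
      (PySem.Str.join "" (PySem.List.slice vars_tuple (some 2) none))
  else "Карта слишком велика для вывода в консоль (максимум 5 переменных)."

-- ===== PORT B =====
-- format(x, f'0{n}b') — exact for x < 2^n (the only way _gray calls it)
def kmapBinPad : Nat → Nat → String
  | 0, _ => ""
  | k + 1, x => kmapBinPad k (x / 2) ++ (if x % 2 = 1 then "1" else "0")

-- _gray(n): reflected Gray code sequence for n bits, ('',) for 0 bits
def kmapGray (n : Nat) : List String :=
  if n = 0 then [""]
  else (List.range (2 ^ n)).map (fun i => kmapBinPad n (i ^^^ (i >>> 1)))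

def build_karnaugh_map_string_alt (table : List (List Int × Int)) (vars_count : Int) (vars_tuple : List String) : String :=
  if vars_count = 1 ∨ vars_count = 2 ∨ vars_count = 3 ∨ vars_count = 4 ∨ vars_count = 5 then
    let table_dict := kmapTableDict table
    -- vars_count ∈ {1..5} here, so Python's vars_count // 2 is toNat / 2
    let row_bits : Nat := vars_count.toNat / 2
    let rows := kmapGray row_bits
    let cols := kmapGray (vars_count.toNat - row_bits)
    let row_vars := PySem.Str.join "" (PySem.List.slice vars_tuple none (some (row_bits : Int)))
    let col_vars := PySem.Str.join "" (PySem.List.slice vars_tuple (some (row_bits : Int)) none)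
    kmapRender table_dict cols rows row_vars col_vars
  else "Карта слишком велика для вывода в консоль (максимум 5 переменных)."

-- ===== PRECONDITION & SPEC =====
-- Pre_ excludes (a) the inputs where A raises IndexError (vars_count 1, 2 or 3 with vars_tuple
-- shorter than the indices A reads), and (b) vars_tuple longer than vars_count for vars_count 1
-- or 2, where A's use of only the first one/two names (vs. B's slice to the end, as A itself does
-- for vars_count 3..5) is an accidental corner: a caller supplies exactly vars_count names.
def Pre_build_karnaugh_map_string (table : List (List Int × Int)) (vars_count : Int) (vars_tuple : List String) : Prop :=
  (vars_count = 1 → vars_tuple.length = 1) ∧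
  (vars_count = 2 → vars_tuple.length = 2) ∧
  (vars_count = 3 → vars_tuple ≠ [])
instance (table : List (List Int × Int)) (vars_count : Int) (vars_tuple : List String) : Decidable (Pre_build_karnaugh_map_string table vars_count vars_tuple) := by unfold Pre_build_karnaugh_map_string; infer_instance

def pvWitness_build_karnaugh_map_string : (List (List Int × Int)) × Int × List String :=
  ([([0, 0], 1), ([0, 1], 0), ([1, 0], 0), ([1, 1], 1)], 2, ["a", "b"])

def Spec_build_karnaugh_map_string (table : List (List Int × Int)) (vars_count : Int) (vars_tuple : List String) (out : String) : Prop := out = build_karnaugh_map_string_alt table vars_count vars_tuple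
instance (table : List (List Int × Int)) (vars_count : Int) (vars_tuple : List String) (out : String) : Decidable (Spec_build_karnaugh_map_string table vars_count vars_tuple out) := by unfold Spec_build_karnaugh_map_string; infer_instance

-- ===== CLAIM (what is proved, stated in full; the proofs are below) =====
def Claim_equal_build_karnaugh_map_string : Prop := ∀ (table : List (List Int × Int)) (vars_count : Int) (vars_tuple : List String), Dom_build_karnaugh_map_string table vars_count vars_tuple → Pre_build_karnaugh_map_string table vars_count vars_tuple → Spec_build_karnaugh_map_string table vars_count vars_tuple (build_karnaugh_map_string table vars_count vars_tuple)

-- ===== LEMMAS AND PROOFS =====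

theorem kmapGray_zero : kmapGray 0 = [""] := by decide
theorem kmapGray_one : kmapGray 1 = ["0", "1"] := by decide
theorem kmapGray_two : kmapGray 2 = ["00", "01", "11", "10"] := by decide
theorem kmapGray_three :
    kmapGray 3 = ["000", "001", "011", "010", "110", "111", "101", "100"] := by decide

theorem join_empty_nil : PySem.Str.join "" ([] : List String) = "" := by decide

theorem join_empty_singleton (x : String) : PySem.Str.join "" [x] = x := by
  simp [PySem.Str.join]

-- ===== VERDICT (by name: the statement is the Claim_ definition above) =====
theorem build_karnaugh_map_string_spec : Claim_equal_build_karnaugh_map_string := by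
  intro table vc vt _hdom hpre
  obtain ⟨h1, h2, h3⟩ := hpre
  unfold Spec_build_karnaugh_map_string
  unfold build_karnaugh_map_string build_karnaugh_map_string_alt
  by_cases hv1 : vc = 1
  · subst hv1
    match vt, h1 rfl with
    | [a], _ =>
      simp [kmapGray_zero, kmapGray_one, join_empty_nil, join_empty_singleton,
        PySem.List.slice_to, PySem.List.slice_from]
  · by_cases hv2 : vc = 2
    · subst hv2
      match vt, h2 rfl with
      | [a, b], _ =>
        simp [kmapGray_one, join_empty_singleton,
          PySem.List.slice_to, PySem.List.slice_from]
    · by_cases hv3 : vc = 3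
      · subst hv3
        match vt, h3 rfl with
        | a :: rest, _ =>
          simp [kmapGray_one, kmapGray_two, join_empty_singleton,
            PySem.List.slice_to, PySem.List.slice_from]
      · by_cases hv4 : vc = 4
        · subst hv4
          simp [kmapGray_two]
        · by_cases hv5 : vc = 5
          · subst hv5
            simp [kmapGray_two, kmapGray_three]
          · simp [hv1, hv2, hv3, hv4, hv5]
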